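-- pv_equiv track=rewrite | github.com/smrodriguezv/Reto-Mutante | esMutante/metodoSecuencia.py | BuscaSecuencia
-- ===== SOURCE A (Python) =====
-- SEC_PERMITIDA= ("AAAA","CCCC","GGGG","TTTT") #Representa las secuencias que identifica las posibilidad de ser Mutante.
--
-- SEC_VALIDA = 2 #Representa la cantidad minima de secuencias validas.
--
-- def BuscaSecuencia (dnaEje):
--     cantSec=0
--     for i in range(len(SEC_PERMITIDA)):
--         encuentro=dnaEje.find(SEC_PERMITIDA[i],0,(len(dnaEje)-1))
--         while (encuentro>=0):
--             cantSec +=1;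
--             encuentro=dnaEje.find(SEC_PERMITIDA[i],(encuentro+len(SEC_PERMITIDA[i])),(len(dnaEje)-1))
--             if cantSec >= SEC_VALIDA:
--                 return cantSec
--         if cantSec >= SEC_VALIDA:
--             return cantSec
--     return cantSec
-- ===== SOURCE B (Python) =====
-- SEC_PERMITIDA= ("AAAA","CCCC","GGGG","TTTT")
--
-- SEC_VALIDA = 2
--
-- def BuscaSecuencia(dnaEje):
--     # One run-length pass over dnaEje[:-1] (A's end bound excludes matches
--     # touching the last character); add run_len // 4 per run of A/C/G/T, cap at 2.
--     total = 0
--     run_char = ''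
--     run_len = 0
--     for ch in dnaEje[:-1]:
--         if ch == run_char:
--             run_len += 1
--         else:
--             if run_char in 'ACGT':
--                 total += run_len // 4
--             run_char = ch
--             run_len = 1
--     if run_char in 'ACGT':
--         total += run_len // 4
--     return 2 if total > 2 else total
-- ===== Notes on version B (the rewrite author's own statement) =====
-- stated objective: alternative
-- what changed: A scans the string up to four times with repeated str.find calls (one greedy scan per fixed pattern AAAA/CCCC/GGGG/TTTT); B makes a single left-to-right run-length pass over dnaEje[:-1], adding run_len // 4 for each maximal run of A/C/G/T and capping the result at 2.
import Mathlib
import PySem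

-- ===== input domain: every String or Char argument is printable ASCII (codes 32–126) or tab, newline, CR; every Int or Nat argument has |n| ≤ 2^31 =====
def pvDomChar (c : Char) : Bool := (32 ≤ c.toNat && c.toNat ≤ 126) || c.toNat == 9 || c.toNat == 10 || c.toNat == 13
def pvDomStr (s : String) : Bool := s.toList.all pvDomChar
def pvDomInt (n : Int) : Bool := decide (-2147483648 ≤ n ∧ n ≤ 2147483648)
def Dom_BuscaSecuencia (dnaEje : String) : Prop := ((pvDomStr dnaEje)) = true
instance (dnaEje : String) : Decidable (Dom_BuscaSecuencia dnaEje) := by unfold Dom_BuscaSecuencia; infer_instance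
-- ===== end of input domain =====

-- B replaces A's four repeated find-scans by one left-to-right run-length pass
-- over dnaEje[:-1] (alternative decomposition, same exact return value).


-- ===== PORT A =====
def pvSecPermitida : List String := ["AAAA", "CCCC", "GGGG", "TTTT"]

-- the inner 'while (encuentro>=0)' loop; cantSec grows by 1 each pass and the
-- loop returns as soon as cantSec >= 2, so (2 - cantSec).toNat decreases
def pvWhileA (dnaEje p : String) (encuentro cantSec : Int) : Int :=
  if 0 ≤ encuentro then
    let cantSec' := cantSec + 1
    let encuentro' := PySem.Str.findFrom dnaEje p (encuentro + PySem.Str.len p)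
        (some (PySem.Str.len dnaEje - 1))
    if 2 ≤ cantSec' then cantSec'
    else pvWhileA dnaEje p encuentro' cantSec'
  else cantSec
termination_by (2 - cantSec).toNat
decreasing_by omega

-- the outer 'for i in range(len(SEC_PERMITIDA))' loop with its early return
def pvForA (dnaEje : String) (ps : List String) (cantSec : Int) : Int :=
  match ps with
  | [] => cantSec
  | p :: rest =>
    let c := pvWhileA dnaEje p
      (PySem.Str.findFrom dnaEje p 0 (some (PySem.Str.len dnaEje - 1))) cantSec
    if 2 ≤ c then c else pvForA dnaEje rest c

def BuscaSecuencia (dnaEje : String) : Int := pvForA dnaEje pvSecPermitida 0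

-- ===== PORT B =====
-- flush of a finished run: if run_char in 'ACGT': total += run_len // 4
def pvFlushB (run_char : List Char) (run_len total : Int) : Int :=
  if PySem.Chars.isIn run_char "ACGT".toList then total + PySem.Int.floordiv run_len 4
  else total

-- loop body of B's single pass (state = (run_char, run_len, total))
def pvStepB (st : List Char × Int × Int) (ch : Char) : List Char × Int × Int :=
  match st with
  | (rc, rl, tot) => if [ch] = rc then (rc, rl + 1, tot) else ([ch], 1, pvFlushB rc rl tot)

def BuscaSecuencia_alt (dnaEje : String) : Int :=
  match (PySem.List.slice dnaEje.toList none (some (-1))).foldl pvStepB ([], 0, 0) with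
  | (rc, rl, tot) =>
    let total := pvFlushB rc rl tot
    if 2 < total then 2 else total

-- ===== PRECONDITION & SPEC =====
def Spec_BuscaSecuencia (dnaEje : String) (out : Int) : Prop := out = BuscaSecuencia_alt dnaEje
instance (dnaEje : String) (out : Int) : Decidable (Spec_BuscaSecuencia dnaEje out) := by unfold Spec_BuscaSecuencia; infer_instance

-- ===== CLAIM (what is proved, stated in full; the proofs are below) =====
def Claim_equal_BuscaSecuencia : Prop := ∀ (dnaEje : String), Dom_BuscaSecuencia dnaEje → Spec_BuscaSecuencia dnaEje (BuscaSecuencia dnaEje)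

-- ===== LEMMAS AND PROOFS =====

-- common value both sides compute: greedy non-overlapping count of cccc in u
def pvG (u : List Char) (c : Char) : Nat :=
  if h : 0 ≤ PySem.Chars.find u [c, c, c, c] then
    1 + pvG (u.drop ((PySem.Chars.find u [c, c, c, c]).toNat + 4)) c
  else 0
termination_by u.length
decreasing_by
  have h4 : ([c, c, c, c] : List Char).length ≤ u.length :=
    ((PySem.Chars.find_nonneg_iff u [c, c, c, c]).mp h).length_le
  simp only [List.length_drop, List.length_cons, List.length_nil] at h4 ⊢
  omega

def pvSG (u : List Char) : Nat := pvG u 'A' + pvG u 'C' + pvG u 'G' + pvG u 'T'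

lemma pv_find_nil (sub : List Char) (h : sub ≠ []) : PySem.Chars.find [] sub = -1 := by
  rw [PySem.Chars.find_eq_neg_one_iff]
  simp [List.infix_nil, h]

lemma pv_find_eq_zero_of_prefix {u sub : List Char} (h : sub <+: u) :
    PySem.Chars.find u sub = 0 := by
  have h0 : 0 ≤ PySem.Chars.find u sub :=
    (PySem.Chars.find_nonneg_iff u sub).mpr h.isInfix
  obtain ⟨_, hmin⟩ := PySem.Chars.find_spec h0
  by_contra hne
  exact hmin 0 (by omega) (by simpa using h)

-- bridge: A's find with end bound len-1 is a plain find inside dropLast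
lemma pv_pvG_nil (c : Char) : pvG [] c = 0 := by
  rw [pvG]
  simp [pv_find_nil [c, c, c, c] (by simp)]

lemma pv_SG_nil : pvSG [] = 0 := by
  simp [pvSG, pv_pvG_nil]

lemma pv_findFrom_drop (s sub : List Char) (hsub : sub ≠ []) (k : Nat) :
    PySem.Chars.findFrom s sub (k : Int) (some ((s.length : Int) - 1)) =
      if PySem.Chars.find (s.dropLast.drop k) sub = -1 then -1
      else (k : Int) + PySem.Chars.find (s.dropLast.drop k) sub := by
  simp only [PySem.Chars.findFrom]
  rcases Nat.eq_zero_or_pos s.length with h0 | h0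
  · have hs : s = [] := List.length_eq_zero_iff.mp h0
    subst hs
    simp [pv_find_nil sub hsub]
  · have he : ¬ ((s.length : Int) < (s.length : Int) - 1) := by omega
    have he2 : ¬ ((s.length : Int) - 1 < 0) := by omega
    rw [if_neg he, if_neg he2]
    rw [if_neg (show ¬ ((k : Int) < 0) by omega)]
    by_cases hks : (s.length : Int) - 1 < (k : Int)
    · rw [if_pos hks]
      have hdrop : s.dropLast.drop k = [] := by
        apply List.drop_eq_nil_of_le
        simp only [List.length_dropLast]
        omega
      rw [hdrop, pv_find_nil sub hsub, if_pos rfl]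
    · rw [if_neg hks]
      have htake : List.take ((s.length : Int) - 1).toNat s = s.dropLast := by
        rw [List.dropLast_eq_take]
        congr 1
        omega
      have hkt : ((k : Int)).toNat = k := by omega
      rw [hkt, htake]

-- if no occurrence of sub starts inside w, find on w ++ v is find on v shifted
lemma pv_find_append (w v sub : List Char)
    (hblock : ∀ j, j < w.length → ¬ sub <+: (w ++ v).drop j) :
    PySem.Chars.find (w ++ v) sub =
      if PySem.Chars.find v sub = -1 then -1
      else (w.length : Int) + PySem.Chars.find v sub := by
  have hdropge : ∀ j : Nat, (w ++ v).drop (w.length + j) = v.drop j := by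
    intro j
    rw [List.drop_append]
    simp
  rcases eq_or_lt_of_le (PySem.Chars.neg_one_le_find v sub) with hneg | hpos
  · -- no occurrence in v
    rw [if_pos hneg.symm]
    have hneg' : ¬ sub <:+: v := (PySem.Chars.find_eq_neg_one_iff v sub).mp hneg.symm
    rw [PySem.Chars.find_eq_neg_one_iff]
    intro hinf
    have hex : ∃ j, sub <+: (w ++ v).drop j := by
      obtain ⟨p, q, hpq⟩ := hinf
      exact ⟨p.length, by rw [← hpq, List.drop_append]; simp [List.prefix_append]⟩
    obtain ⟨j, hj⟩ := hex
    rcases Nat.lt_or_ge j w.length with hjw | hjw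
    · exact hblock j hjw hj
    · obtain ⟨j', rfl⟩ : ∃ j', j = w.length + j' := ⟨j - w.length, by omega⟩
      rw [hdropge j'] at hj
      exact hneg' (hj.isInfix.trans (List.drop_suffix j' v).isInfix)
  · -- occurrence in v at i'
    have h0v : 0 ≤ PySem.Chars.find v sub := by omega
    have hne0 : PySem.Chars.find v sub ≠ -1 := by omega
    rw [if_neg hne0]
    obtain ⟨hpv, hminv⟩ := PySem.Chars.find_spec h0v
    have hpw : sub <+: (w ++ v).drop (w.length + (PySem.Chars.find v sub).toNat) := by
      rw [hdropge]; exact hpv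
    have h0w : 0 ≤ PySem.Chars.find (w ++ v) sub := by
      rw [PySem.Chars.find_nonneg_iff]
      exact hpw.isInfix.trans ((List.drop_suffix _ _).isInfix)
    obtain ⟨hpww, hminw⟩ := PySem.Chars.find_spec h0w
    have hle : (PySem.Chars.find (w ++ v) sub).toNat ≤ w.length + (PySem.Chars.find v sub).toNat := by
      by_contra hlt
      exact hminw _ (by omega) hpw
    have hge1 : w.length ≤ (PySem.Chars.find (w ++ v) sub).toNat := by
      by_contra hlt
      exact hblock _ (by omega) hpww
    obtain ⟨j', hje⟩ : ∃ j', (PySem.Chars.find (w ++ v) sub).toNat = w.length + j' :=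
      ⟨(PySem.Chars.find (w ++ v) sub).toNat - w.length, by omega⟩
    have hj'v : sub <+: v.drop j' := by rw [hje, hdropge] at hpww; exact hpww
    have hge2 : (PySem.Chars.find v sub).toNat ≤ j' := by
      by_contra hlt
      exact hminv j' (by omega) hj'v
    omega

lemma pv_blocked_ne (c d : Char) (hne : d ≠ c) (k : Nat) (v : List Char) :
    ∀ j, j < (List.replicate k c).length →
      ¬ [d, d, d, d] <+: ((List.replicate k c ++ v)).drop j := by
  intro j hj hpre
  simp only [List.length_replicate] at hj
  have hdrop : (List.replicate k c ++ v).drop j = List.replicate (k - j) c ++ v.drop (j - k) := by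
    rw [List.drop_append, List.drop_replicate]
    simp only [List.length_replicate]
  rw [hdrop] at hpre
  have h0 : ([d, d, d, d] : List Char)[0] = (List.replicate (k - j) c ++ v.drop (j - k))[0]'
      (by simp [List.length_append]; omega) := hpre.getElem (by simp)
  rw [List.getElem_append_left (by simp; omega)] at h0
  simp only [List.getElem_replicate] at h0
  exact hne (by simpa using h0)

lemma pv_blocked_short (c : Char) (k : Nat) (hk : k < 4) (v : List Char)
    (hv : v.head? ≠ some c) :
    ∀ j, j < (List.replicate k c).length →
      ¬ [c, c, c, c] <+: ((List.replicate k c ++ v)).drop j := by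
  intro j hj hpre
  simp only [List.length_replicate] at hj
  have hdrop : (List.replicate k c ++ v).drop j = List.replicate (k - j) c ++ v := by
    rw [List.drop_append, List.drop_replicate]
    simp only [List.length_replicate]
    congr 1
    rw [show j - k = 0 by omega, List.drop_zero]
  rw [hdrop] at hpre
  match v, hv with
  | [], _ =>
    have hlen := hpre.length_le
    simp only [List.length_append, List.length_replicate, List.length_nil, List.length_cons,
      Nat.add_zero] at hlen
    omega
  | y :: ys, hv =>
    have hy : y ≠ c := by simpa using hv
    have hm : k - j < ([c, c, c, c] : List Char).length := by simp; omega
    have h0 : ([c, c, c, c] : List Char)[k - j]'hm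
        = (List.replicate (k - j) c ++ y :: ys)[k - j]'
            (by simp only [List.length_append, List.length_replicate, List.length_cons]
                omega) := hpre.getElem hm
    rw [List.getElem_append_right (by simp)] at h0
    simp only [List.length_replicate, Nat.sub_self, List.getElem_cons_zero] at h0
    have hc4 : ∀ (i : Nat) (hi : i < 4), ([c, c, c, c] : List Char)[i] = c := by
      intro i hi
      interval_cases i <;> rfl
    exact hy (((hc4 (k - j) (by omega)).symm.trans h0).symm)

-- G2: a run of c is transparent for pattern dddd, d ≠ c
lemma pv_G_run_ne (c d : Char) (hne : d ≠ c) (k : Nat) (v : List Char) :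
    pvG (List.replicate k c ++ v) d = pvG v d := by
  have hblock := pv_blocked_ne c d hne k v
  have hf := pv_find_append (List.replicate k c) v [d, d, d, d] hblock
  simp only [List.length_replicate] at hf
  by_cases hcase : PySem.Chars.find v [d, d, d, d] = -1
  · rw [if_pos hcase] at hf
    rw [pvG, dif_neg (show ¬ 0 ≤ PySem.Chars.find (List.replicate k c ++ v) [d, d, d, d] by
      rw [hf]; omega)]
    rw [pvG, dif_neg (show ¬ 0 ≤ PySem.Chars.find v [d, d, d, d] by rw [hcase]; omega)]
  · rw [if_neg hcase] at hf
    have h0v : 0 ≤ PySem.Chars.find v [d, d, d, d] := by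
      have := PySem.Chars.neg_one_le_find v [d, d, d, d]
      omega
    rw [pvG, hf, dif_pos (show 0 ≤ (k : Int) + PySem.Chars.find v [d, d, d, d] by omega)]
    conv_rhs => rw [pvG, dif_pos h0v]
    congr 1
    have htn : ((k : Int) + PySem.Chars.find v [d, d, d, d]).toNat
        = k + (PySem.Chars.find v [d, d, d, d]).toNat := by omega
    rw [htn, List.drop_append, List.drop_replicate]
    simp only [List.length_replicate]
    rw [show k - (k + (PySem.Chars.find v [d, d, d, d]).toNat + 4) = 0 by omega]
    rw [show k + (PySem.Chars.find v [d, d, d, d]).toNat + 4 - k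
          = (PySem.Chars.find v [d, d, d, d]).toNat + 4 by omega]
    simp

-- G1: a run of c contributes k / 4 matches of cccc
lemma pv_G_run_eq (c : Char) (k : Nat) (v : List Char) (hv : v.head? ≠ some c) :
    pvG (List.replicate k c ++ v) c = k / 4 + pvG v c := by
  induction k using Nat.strong_induction_on with
  | _ k ih =>
    by_cases hk4 : 4 ≤ k
    · have hrep : List.replicate k c = [c, c, c, c] ++ List.replicate (k - 4) c := by
        rw [show ([c, c, c, c] : List Char) = List.replicate 4 c from rfl, ← List.replicate_add]
        congr 1
        omega
      have hpref : ([c, c, c, c] : List Char) <+: List.replicate k c ++ v := by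
        rw [hrep, List.append_assoc]
        exact List.prefix_append _ _
      have hf0 := pv_find_eq_zero_of_prefix hpref
      rw [pvG, dif_pos (by rw [hf0]), hf0]
      have hdrop : (List.replicate k c ++ v).drop ((0 : Int).toNat + 4)
          = List.replicate (k - 4) c ++ v := by
        rw [List.drop_append, List.drop_replicate]
        simp only [List.length_replicate]
        rw [show (0 : Int).toNat + 4 - k = 0 by omega, List.drop_zero]
        rw [show (0 : Int).toNat + 4 = 4 by omega]
      rw [hdrop, ih (k - 4) (by omega)]
      omega
    · have hblock := pv_blocked_short c k (by omega) v hv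
      have hf := pv_find_append (List.replicate k c) v [c, c, c, c] hblock
      simp only [List.length_replicate] at hf
      rw [show k / 4 = 0 by omega, Nat.zero_add]
      by_cases hcase : PySem.Chars.find v [c, c, c, c] = -1
      · rw [if_pos hcase] at hf
        rw [pvG, dif_neg (show ¬ 0 ≤ PySem.Chars.find (List.replicate k c ++ v) [c, c, c, c] by
          rw [hf]; omega)]
        rw [pvG, dif_neg (show ¬ 0 ≤ PySem.Chars.find v [c, c, c, c] by rw [hcase]; omega)]
      · rw [if_neg hcase] at hf
        have h0v : 0 ≤ PySem.Chars.find v [c, c, c, c] := by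
          have := PySem.Chars.neg_one_le_find v [c, c, c, c]
          omega
        rw [pvG, hf, dif_pos (show 0 ≤ (k : Int) + PySem.Chars.find v [c, c, c, c] by omega)]
        conv_rhs => rw [pvG, dif_pos h0v]
        congr 1
        have htn : ((k : Int) + PySem.Chars.find v [c, c, c, c]).toNat
            = k + (PySem.Chars.find v [c, c, c, c]).toNat := by omega
        rw [htn, List.drop_append, List.drop_replicate]
        simp only [List.length_replicate]
        rw [show k - (k + (PySem.Chars.find v [c, c, c, c]).toNat + 4) = 0 by omega]
        rw [show k + (PySem.Chars.find v [c, c, c, c]).toNat + 4 - k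
              = (PySem.Chars.find v [c, c, c, c]).toNat + 4 by omega]
        simp

lemma pv_SG_run (c : Char) (k : Nat) (v : List Char) (hv : v.head? ≠ some c) :
    pvSG (List.replicate k c ++ v) =
      (if c ∈ (['A', 'C', 'G', 'T'] : List Char) then k / 4 else 0) + pvSG v := by
  by_cases hc : c ∈ (['A', 'C', 'G', 'T'] : List Char)
  · rw [if_pos hc]
    fin_cases hc
    · rw [pvSG, pvSG, pv_G_run_eq 'A' k v hv, pv_G_run_ne 'A' 'C' (by decide) k v,
        pv_G_run_ne 'A' 'G' (by decide) k v, pv_G_run_ne 'A' 'T' (by decide) k v]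
      omega
    · rw [pvSG, pvSG, pv_G_run_eq 'C' k v hv, pv_G_run_ne 'C' 'A' (by decide) k v,
        pv_G_run_ne 'C' 'G' (by decide) k v, pv_G_run_ne 'C' 'T' (by decide) k v]
      omega
    · rw [pvSG, pvSG, pv_G_run_eq 'G' k v hv, pv_G_run_ne 'G' 'A' (by decide) k v,
        pv_G_run_ne 'G' 'C' (by decide) k v, pv_G_run_ne 'G' 'T' (by decide) k v]
      omega
    · rw [pvSG, pvSG, pv_G_run_eq 'T' k v hv, pv_G_run_ne 'T' 'A' (by decide) k v,
        pv_G_run_ne 'T' 'C' (by decide) k v, pv_G_run_ne 'T' 'G' (by decide) k v]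
      omega
  · rw [if_neg hc]
    simp only [List.mem_cons, List.not_mem_nil, or_false, not_or] at hc
    obtain ⟨h1, h2, h3, h4⟩ := hc
    rw [pvSG, pvSG, pv_G_run_ne c 'A' (Ne.symm h1) k v, pv_G_run_ne c 'C' (Ne.symm h2) k v,
      pv_G_run_ne c 'G' (Ne.symm h3) k v, pv_G_run_ne c 'T' (Ne.symm h4) k v]
    omega

-- ---- A side ----

lemma pv_whileA_eq (s p : String) (c : Char) (hp : p.toList = [c, c, c, c]) :
    ∀ (n k : Nat) (cant : Int), s.toList.dropLast.length - k ≤ n → 0 ≤ cant → cant ≤ 1 →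
      pvWhileA s p (PySem.Str.findFrom s p (k : Int) (some (PySem.Str.len s - 1))) cant
        = min 2 (cant + (pvG (s.toList.dropLast.drop k) c : Int)) := by
  have hpl : p.toList ≠ [] := by rw [hp]; simp
  have hff : ∀ k : Nat, PySem.Str.findFrom s p (k : Int) (some (PySem.Str.len s - 1))
      = if PySem.Chars.find (s.toList.dropLast.drop k) [c, c, c, c] = -1 then -1
        else (k : Int) + PySem.Chars.find (s.toList.dropLast.drop k) [c, c, c, c] := by
    intro k
    rw [PySem.Str.findFrom_eq, PySem.Str.len_eq, pv_findFrom_drop s.toList p.toList hpl k, hp]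
  intro n
  induction n with
  | zero =>
    intro k cant hn h0 h1
    have hdrop : s.toList.dropLast.drop k = [] := List.drop_eq_nil_of_le (by omega)
    rw [hff k, hdrop, pv_find_nil _ (by simp), if_pos rfl, pvWhileA,
      if_neg (show ¬ (0 : Int) ≤ -1 by omega), pv_pvG_nil]
    omega
  | succ m ih =>
    intro k cant hn h0 h1
    set u := s.toList.dropLast with hu
    by_cases hneg : PySem.Chars.find (u.drop k) [c, c, c, c] = -1
    · rw [hff k, if_pos hneg, pvWhileA, if_neg (show ¬ (0 : Int) ≤ -1 by omega),
        pvG, dif_neg (show ¬ 0 ≤ PySem.Chars.find (u.drop k) [c, c, c, c] by omega)]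
      omega
    · have h0f : 0 ≤ PySem.Chars.find (u.drop k) [c, c, c, c] := by
        have := PySem.Chars.neg_one_le_find (u.drop k) [c, c, c, c]
        omega
      have hinf : ([c, c, c, c] : List Char).length ≤ (u.drop k).length :=
        ((PySem.Chars.find_nonneg_iff _ _).mp h0f).length_le
      simp only [List.length_cons, List.length_nil, List.length_drop] at hinf
      rw [hff k, if_neg hneg, pvWhileA,
        if_pos (show (0 : Int) ≤ (k : Int) + PySem.Chars.find (u.drop k) [c, c, c, c] by omega)]
      rw [pvG, dif_pos h0f]
      by_cases hc1 : (2 : Int) ≤ cant + 1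
      · rw [if_pos hc1]
        push_cast
        omega
      · rw [if_neg hc1]
        have hlen4 : PySem.Str.len p = 4 := by rw [PySem.Str.len_eq, hp]; rfl
        have hcast : (k : Int) + PySem.Chars.find (u.drop k) [c, c, c, c] + PySem.Str.len p
            = ((k + (PySem.Chars.find (u.drop k) [c, c, c, c]).toNat + 4 : Nat) : Int) := by
          rw [hlen4]
          push_cast
          omega
        rw [hcast, ih (k + (PySem.Chars.find (u.drop k) [c, c, c, c]).toNat + 4) (cant + 1)
          (by omega) (by omega) (by omega)]
        rw [List.drop_drop]
        rw [show k + ((PySem.Chars.find (List.drop k u) [c, c, c, c]).toNat + 4)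
              = k + (PySem.Chars.find (List.drop k u) [c, c, c, c]).toNat + 4 by omega]
        push_cast
        omega

lemma pv_forA_eq (s : String) :
    ∀ (cs : List Char) (cant : Int), 0 ≤ cant → cant ≤ 1 →
      pvForA s (cs.map fun c => String.ofList [c, c, c, c]) cant
        = min 2 (cant + ((cs.map (pvG s.toList.dropLast ·)).sum : Int)) := by
  intro cs
  induction cs with
  | nil =>
    intro cant h0 h1
    simp only [List.map_nil, pvForA, List.sum_nil, Nat.cast_zero]
    omega
  | cons c cs' ih =>
    intro cant h0 h1
    simp only [List.map_cons, pvForA, List.sum_cons]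
    have hw := pv_whileA_eq s (String.ofList [c, c, c, c]) c (by simp)
      s.toList.dropLast.length 0 cant (by omega) h0 h1
    simp only [Nat.cast_zero, List.drop_zero] at hw
    rw [hw]
    by_cases hcv : (2 : Int) ≤ min 2 (cant + (pvG s.toList.dropLast c : Int))
    · rw [if_pos hcv]
      omega
    · rw [if_neg hcv, ih (min 2 (cant + (pvG s.toList.dropLast c : Int))) (by omega) (by omega)]
      omega

-- ---- B side ----

def pvBfin (st : List Char × Int × Int) (v : List Char) : Int :=
  match v.foldl pvStepB st with
  | (rc, rl, tot) => pvFlushB rc rl tot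

lemma pv_isIn_singleton (c : Char) (l : List Char) :
    PySem.Chars.isIn [c] l = true ↔ c ∈ l := by
  rw [PySem.Chars.isIn_iff_infix, List.singleton_infix_iff]

lemma pv_flush_shift (rc : List Char) (rl t : Int) :
    pvFlushB rc rl t = t + pvFlushB rc rl 0 := by
  unfold pvFlushB; split_ifs <;> omega

lemma pv_Bfin_shift (v : List Char) (rc : List Char) (rl t : Int) :
    pvBfin (rc, rl, t) v = t + pvBfin (rc, rl, 0) v := by
  induction v generalizing rc rl t with
  | nil =>
    simp only [pvBfin, List.foldl_nil]
    exact pv_flush_shift rc rl t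
  | cons x xs ih =>
    simp only [pvBfin, List.foldl_cons, pvStepB]
    by_cases hx : [x] = rc
    · rw [if_pos hx, if_pos hx]
      have h1 := ih rc (rl + 1) t
      have h2 := ih rc (rl + 1) 0
      simp only [pvBfin] at h1 h2
      rw [h1, h2]
    · rw [if_neg hx, if_neg hx]
      have h1 := ih [x] 1 (pvFlushB rc rl t)
      have h2 := ih [x] 1 (pvFlushB rc rl 0)
      simp only [pvBfin] at h1 h2
      rw [h1, h2, pv_flush_shift rc rl t]; ring

lemma pv_run_absorb (c : Char) (k : Nat) :
    ∀ (rl t : Int), (List.replicate k c).foldl pvStepB ([c], rl, t) = ([c], rl + k, t) := by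
  induction k with
  | zero => simp
  | succ n ih =>
    intro rl t
    rw [List.replicate_succ, List.foldl_cons]
    have hstep : pvStepB ([c], rl, t) c = ([c], rl + 1, t) := by simp [pvStepB]
    rw [hstep, ih (rl + 1) t]
    simp only [Prod.mk.injEq]
    exact ⟨trivial, by push_cast; ring, trivial⟩

lemma pv_Bfin_run (c : Char) (k : Nat) (hk : 0 < k) (v : List Char) (hv : v.head? ≠ some c) :
    pvBfin ([], 0, 0) (List.replicate k c ++ v) =
      (if c ∈ (['A', 'C', 'G', 'T'] : List Char) then ((k / 4 : Nat) : Int) else 0)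
        + pvBfin ([], 0, 0) v := by
  obtain ⟨k', rfl⟩ : ∃ k', k = k' + 1 := ⟨k - 1, by omega⟩
  have h0 : pvFlushB [] 0 0 = 0 := by decide
  have hrep : List.foldl pvStepB ([], 0, 0) (List.replicate (k' + 1) c) = ([c], 1 + (k' : Int), 0) := by
    have hstep0 : pvStepB ([], 0, 0) c = ([c], 1, 0) := by simp [pvStepB, h0]
    rw [List.replicate_succ, List.foldl_cons, hstep0, pv_run_absorb c k' 1 0]
  have hflush : pvFlushB [c] (1 + (k' : Int)) 0 =
      (if c ∈ (['A', 'C', 'G', 'T'] : List Char) then (((k' + 1) / 4 : Nat) : Int) else 0) := by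
    unfold pvFlushB
    by_cases hc : c ∈ (['A', 'C', 'G', 'T'] : List Char)
    · rw [if_pos ((pv_isIn_singleton c _).mpr (by simpa using hc)), if_pos hc]
      have hcast : (1 : Int) + (k' : Int) = ((k' + 1 : Nat) : Int) := by push_cast; ring
      rw [zero_add, hcast]
      exact_mod_cast PySem.Int.floordiv_natCast (k' + 1) 4
    · rw [if_neg (by rw [pv_isIn_singleton c]; simpa using hc), if_neg hc]
  have key : pvBfin ([], 0, 0) (List.replicate (k' + 1) c ++ v) = pvBfin ([c], 1 + (k' : Int), 0) v := by
    rw [pvBfin, pvBfin, List.foldl_append, hrep]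
  rw [key]
  match v, hv with
  | [], _ =>
    have hnil : pvBfin ([c], 1 + (k' : Int), 0) [] = pvFlushB [c] (1 + (k' : Int)) 0 := by
      rw [pvBfin, List.foldl_nil]
    have hnil0 : pvBfin ([], 0, 0) ([] : List Char) = 0 := by
      rw [pvBfin, List.foldl_nil]; exact h0
    rw [hnil, hnil0, hflush, add_zero]
  | x :: xs, hv =>
    have hx : ([x] : List Char) ≠ [c] := by
      simp only [List.head?_cons, ne_eq, Option.some.injEq] at hv
      simpa using hv
    have hstepx : pvStepB ([c], 1 + (k' : Int), 0) x = ([x], 1, pvFlushB [c] (1 + (k' : Int)) 0) := by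
      simp [pvStepB, hx]
    have hconsL : pvBfin ([c], 1 + (k' : Int), 0) (x :: xs)
        = pvBfin ([x], 1, pvFlushB [c] (1 + (k' : Int)) 0) xs := by
      rw [pvBfin, pvBfin, List.foldl_cons, hstepx]
    have hstep0x : pvStepB ([], 0, 0) x = ([x], 1, 0) := by simp [pvStepB, h0]
    have hconsR : pvBfin ([], 0, 0) (x :: xs) = pvBfin ([x], 1, 0) xs := by
      rw [pvBfin, pvBfin, List.foldl_cons, hstep0x]
    rw [hconsL, pv_Bfin_shift xs [x] 1 (pvFlushB [c] (1 + (k' : Int)) 0), hconsR, hflush]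

lemma pv_Bfin_eq_SG : ∀ (u : List Char), pvBfin ([], 0, 0) u = (pvSG u : Int) := by
  intro u
  generalize hn : u.length = n
  induction n using Nat.strong_induction_on generalizing u with
  | _ n ih =>
    match u with
    | [] =>
      have : pvBfin ([], 0, 0) ([] : List Char) = 0 := by
        rw [pvBfin, List.foldl_nil]; decide
      rw [this, pv_SG_nil]; rfl
    | x :: xs =>
      set v := List.dropWhile (· == x) (x :: xs) with hvdef
      set k := (List.takeWhile (· == x) (x :: xs)).length with hkdef
      have htw : List.takeWhile (· == x) (x :: xs) = List.replicate k x := by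
        apply List.eq_replicate_of_mem
        intro b hb
        have := List.mem_takeWhile_imp hb
        simpa [beq_iff_eq] using this
      have hsplit : List.replicate k x ++ v = x :: xs := by
        rw [← htw, hvdef]; exact List.takeWhile_append_dropWhile
      have hk : 0 < k := by
        rw [hkdef, List.takeWhile_cons_of_pos (by simp)]
        simp
      have hv : v.head? ≠ some x := by
        have h := List.head?_dropWhile_not (· == x) (x :: xs)
        rw [← hvdef] at h
        cases hh : v.head? with
        | none => simp
        | some y =>
          rw [hh] at h
          simp only [beq_eq_false_iff_ne, ne_eq] at h
          simpa using h
      have hlen : v.length < n := by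
        have := congrArg List.length hsplit
        simp only [List.length_append, List.length_replicate] at this
        rw [← hn]
        simp only [List.length_cons] at this ⊢
        omega
      rw [← hsplit, pv_Bfin_run x k hk v hv, pv_SG_run x k v hv, ih v.length hlen v rfl]
      split_ifs <;> push_cast <;> ring

lemma pv_slice_neg_one (l : List Char) :
    PySem.List.slice l none (some (-1)) = l.dropLast := by
  simp only [PySem.List.slice, PySem.List.clampIdx_neg_one]
  simp [List.dropLast_eq_take]

-- ===== VERDICT (by name: the statement is the Claim_ definition above) =====
theorem BuscaSecuencia_spec : Claim_equal_BuscaSecuencia := by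
  intro s _
  unfold Spec_BuscaSecuencia
  have hsec : pvSecPermitida
      = (['A', 'C', 'G', 'T'] : List Char).map (fun c => String.ofList [c, c, c, c]) := by
    decide
  have hA : BuscaSecuencia s = min 2 ((pvSG s.toList.dropLast : Nat) : Int) := by
    rw [BuscaSecuencia, hsec, pv_forA_eq s ['A', 'C', 'G', 'T'] 0 (by omega) (by omega)]
    simp only [List.map_cons, List.map_nil, List.sum_cons, List.sum_nil, pvSG]
    push_cast
    ring_nf
  have hB : BuscaSecuencia_alt s
      = if 2 < ((pvSG s.toList.dropLast : Nat) : Int) then 2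
        else ((pvSG s.toList.dropLast : Nat) : Int) := by
    rw [BuscaSecuencia_alt, pv_slice_neg_one]
    have hBf := pv_Bfin_eq_SG s.toList.dropLast
    rcases hfold : List.foldl pvStepB ([], 0, 0) s.toList.dropLast with ⟨rc, rl, tot⟩
    rw [pvBfin, hfold] at hBf
    have hBf' : pvFlushB rc rl tot = ((pvSG s.toList.dropLast : Nat) : Int) := hBf
    show (if 2 < pvFlushB rc rl tot then 2 else pvFlushB rc rl tot)
      = if 2 < ((pvSG s.toList.dropLast : Nat) : Int) then 2
        else ((pvSG s.toList.dropLast : Nat) : Int)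
    rw [hBf']
  rw [hA, hB]
  split_ifs <;> omega
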